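/- PORTED by tools/port_fixed.py from Prog/Jsmn/D/ParseOpen.lean to THE FIXED IMAGE fixed/jsmn_d.bin (same bytes at the same addresses; binFDc). Do not edit: edit the original and port again. -/
/-
  jsmn_d.bin, `jsmn_parse`: `case '{': case '[':` (100344H – 1003A9H, 28 instructions + the `return JSMN_ERROR_NOMEM` stub 10053BH, 2).
      open_tail   100384H → 100462H   token->type = …; token->start = parser->pos; parser->toksuper = parser->toknext - 1
      open_spec   100344H → 100462H | 100529H   count++; tokens == NULL → break; jsmn_alloc_token (by its contract); NULL → return -1;
                                                tokens[toksuper].size++; then open_tail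
  Model: `Jsmn.openBracket`.
-/
import Prog.Jsmn.Fixed.Specs
import Prog.Jsmn.Fixed.CodeFD
import Prog.Jsmn.Fixed.D.ParseCallLemmas
namespace X86
namespace J6
namespace FD
open X86.User (CodeAt RegsKept Span FlagsOK Layout toNat_add_ofNat toNat_ofNat_lt' add_ofNat_add)
open Jsmn JsmnFDBytes

set_option maxRecDepth 100000
set_option maxHeartbeats 4000000
set_option linter.unusedSimpArgs false
set_option linter.unusedVariables false

/-- The switch sends `{` and `[` to `openBracket`. -/
theorem body_open (js : List UInt8) (fuel nt : Nat) (s : St) (ch : UInt8) (h : ch = 0x7b ∨ ch = 0x5b) :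
    body Config.default js fuel nt s ch = some (openBracket Config.default ch nt s) := by
  unfold body
  rcases h with rfl | rfl <;> simp

/-- The parser after the case: `toksuper = toknext - 1`. -/
def openFinP (p' : Parser) : Parser := { p' with toksuper := i32 (p'.toknext - 1) }
/-- The tokens after the case: the fresh token `i` has its type and its start. -/
def openFinT (ch : UInt8) (i : Nat) (p' : Parser) (tsL : Tokens) : Tokens :=
  tsL.set i { tsL.getD i default with type := if ch == 0x7b then JSMN_OBJECT else JSMN_ARRAY, start := i32 p'.pos }

/-- `openBracket` when there is a token array and room in it. -/
theorem openBracket_some {ch : UInt8} {nt : Nat} {s : St} {ts ts' : Tokens} {i : Nat} {p' : Parser} (hst : s.toks = some ts)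
    (hal : allocToken Config.default s.p ts nt = some (i, p', ts')) :
    openBracket Config.default ch nt s = .next ⟨openFinP p', some (openFinT ch i p'
      (if p'.toksuper = -1 then ts' else tokUpd ts' p'.toksuper fun t => { t with size := i32 (t.size + 1) })), i32 (s.count + 1)⟩ := by
  unfold openBracket
  rw [hst]
  simp only [hal]
  by_cases h : p'.toksuper = -1 <;> simp [h, openFinP, openFinT, Config.default]

/-- `parser->toksuper = parser->toknext - 1`, as an `int`. -/
theorem holds32_pred (t : Nat) (h : t < 4294967296) : Holds32 ((Word.low .w32 (UInt64.ofNat t - 1)).toNat % 256 ^ 4) (i32 ((t : Int) - 1)) := by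
  have e : (Word.low .w32 (UInt64.ofNat t - 1)).toNat % 256 ^ 4 = u32 (i32 ((t : Int) - 1)) := by
    have e2 : u32 (i32 ((t : Int) - 1)) = (t + 4294967295) % 4294967296 := by unfold u32 i32; omega
    rw [e2]; v3_omega
  rw [e]
  exact holds32_of_range _ (i32_range _).1 (i32_range _).2

/-- `token->start = parser->pos`, as an `int`. -/
theorem holds32_pos (t : Nat) (h : t < 4294967296) : Holds32 ((Word.low .w32 (UInt64.ofNat t)).toNat % 256 ^ 4) (i32 (t : Int)) := by
  have e : (Word.low .w32 (UInt64.ofNat t)).toNat % 256 ^ 4 = u32 (i32 (t : Int)) := by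
    have e2 : u32 (i32 (t : Int)) = t := by unfold u32 i32; omega
    rw [e2]; v3_omega
  rw [e]
  exact holds32_of_range _ (i32_range _).1 (i32_range _).2

variable {n : User.Layout}

/-- **100384H → 100462H**: the fresh token (`rax = &tokens[i]`) gets its type and start, `toksuper` becomes `toknext - 1`. -/
theorem open_tail {c : PCtx} {v0 v : User.State} {p' : Parser} {tsL : Tokens} {i : Nat} {ch : UInt8}
    (hrip : v.rip = 0x100384) (hco : FrameCore c n v0 v p' (some tsL)) (hrax : v.reg .rax = c.tb + UInt64.ofNat (16 * i))
    (hrbx : v.reg .rbx = ch.toUInt64) (hilt : i < c.numTokens) :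
    Reach n v (fun v' => v'.rip = 0x100462 ∧ FrameCore c n v0 v' (openFinP p') (some (openFinT ch i p' tsL)) ∧ v'.reg .r15 = v.reg .r15) := by
  have hp := hco.entry.pre
  have himg := A2.core_img hco
  have hcode := JsmnFD.tjfd_jsmn_parse_core_code himg
  have hfetch := hp.call.fetch
  obtain ⟨htb0, htlen, htoks⟩ := hco.toksArg
  have hpa := hco.parser
  have henv := hp.env
  have htb : toksBytes binFDc.cfg c.numTokens c.toks0 = 16 * c.numTokens := by
    rw [← A2.toksBytes_congr hco.null]; rfl
  rw [htb] at henv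
  have hR := henv.toksR.resolve_left htb0
  v3_open hco.rsp hco.rbp hco.r12 hp.call henv.parserR hR henv.parserToks hpa.pos hpa.toknext
  clear hp_call_rip
  j6f_bin
  have hposlt : p'.pos < 4294967296 := hpa_pos ▸ User.Mem.readLE4_lt _ _
  have hnextlt : p'.toknext < 4294967296 := hpa_toknext ▸ User.Mem.readLE4_lt _ _
  have hil : i < tsL.length := htlen ▸ hilt
  have hmul := tokSize_mul_le Config.default hil
  rw [tokSize_default, htlen] at hmul
  have ht0 := htoks.getD i hil
  have haddr : tokAddr Config.default c.tb i = c.tb + UInt64.ofNat (16 * i) := by unfold tokAddr; rw [tokSize_default]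
  rw [haddr] at ht0
  have ht0e := ht0.end
  have ht0s := ht0.size
  have hsup := hpa.toksuper
  v3_walk hcode hfetch [show ((233 : Nat) == 235) = false by decide, show ((233 : UInt8) == 235) = false by decide,
    show ((233 : UInt64) == 235) = false by decide] until [0x100462]
  all_goals
    have hch := byte_toUInt64_mod ch
    refine Reach.done ⟨by simp, A2.core_step hco (by v3_regnorm) (by v3_regnorm) (by v3_regnorm) (by v3_regnorm) (by v3_regnorm)
      (by unfold dataWins PCtx.tlen; rw [htb]; v3_same) ⟨by v3_frame hpa_pos, by v3_frame hpa_toknext, holds32_read (by v3_read) (holds32_pred _ hnextlt)⟩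
      ⟨htb0, by simp [openFinT, htlen], ?_⟩ (by simp), by v3_regnorm⟩
    v3_memnorm
    refine TokensAt.update htoks hil (by rw [tokSize_default, htlen]; v3_omega) (by rw [tokSize_default]; v3_eqon)
      (by rw [tokSize_default, htlen]; v3_eqon) ?_
    rw [haddr]
    refine ⟨?_, holds32_read (by v3_read) (holds32_pos _ hposlt), by v3_frame ht0e, by v3_frame ht0s, fun h => absurd h (by decide)⟩
  · have hc : ch = 0x7b := UInt8.toNat_inj.mp (by rw [← hch, hbr_100387]; rfl)
    subst hc
    show _ = JSMN_OBJECT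
    v3_read
  · have hc : ¬ ch = 0x7b := fun h => hbr_100387 (by rw [h]; rfl)
    have : (ch == 0x7b) = false := by simpa using hc
    dsimp only
    rw [this]
    show _ = JSMN_ARRAY
    v3_read

theorem open_spec (sf : SafeFacts binFDc.cfg) (halloc : AllocSpec binFDc n) : OpenSpec n := by
  intro c v0 v s ch fuel hok hat hne
  rw [body_open _ _ _ _ _ hok]
  have hfr := hat.frame
  have hco := hfr.core
  have hen := hco.entry
  have hp := hen.pre
  have hinv := hfr.inv
  have himg := A2.core_img hco
  have hcode := JsmnFD.tjfd_jsmn_parse_core_code himg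
  have hfetch := hp.call.fetch
  v3_open hat.rip hat.rbx hco.rsp hco.rbp hco.r12 hco.ntok hfr.r15 hp.call
  clear hp_call_rip
  j6f_bin
  v3_walk hcode hfetch [] until [0x100462, 0x100529]
  · -- tokens == NULL: only count++
    have hnone : s.toks = none := by
      cases hst : s.toks with
      | none => rfl
      | some ts =>
        have hta := hco.toksArg
        rw [hst] at hta
        exact absurd (show c.tb = 0 by v3_omega) hta.1
    have hb : openBracket Config.default ch c.numTokens s = .next { s with count := i32 (s.count + 1) } := by
      unfold openBracket; rw [hnone]
    have hpa := hco.parser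
    have hta := hco.toksArg
    rw [hb]
    refine Reach.done ⟨by simp, A2.frame_next (fuel := fuel) sf hfr (by rw [body_open _ _ _ _ _ hok, hb]) (A2.core_step hco (by v3_regnorm) (by v3_regnorm) (by v3_regnorm)
      (by v3_regnorm) (by v3_regnorm) (by v3_same) (by v3_memnorm; exact hpa) (by v3_memnorm; exact hta) Iff.rfl) (by v3_regnorm; exact A2.r15_inc _)⟩
  · -- there is a token array: call jsmn_alloc_token
    have hta := hco.toksArg
    obtain ⟨ts, hst⟩ : ∃ ts, s.toks = some ts := by
      cases hst : s.toks with
      | none => rw [hst] at hta; exact absurd hta (by intro h; rw [h] at hbr_10034b; exact hbr_10034b rfl)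
      | some ts => exact ⟨ts, rfl⟩
    rw [hst] at hta
    obtain ⟨htb0, htlen, htoks⟩ := hta
    have hpa := hco.parser
    have hnum := hinv.numR
    have htinv := hinv.toks ts hst
    have henv := hp.env
    have htb : toksBytes binFDc.cfg c.numTokens c.toks0 = 16 * c.numTokens := by
      rw [← A2.toksBytes_congr hco.null, hst]; rfl
    rw [htb] at henv
    have hR := henv.toksR.resolve_left htb0
    v3_open henv hR
    clear henv_toksR
    j6f_bin
    rw [Word.low32_ofNat_of_lt hnum]
    refine Reach.trans (halloc _ 0x100360 c.pa c.tb c.numTokens s.p ts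
      ⟨by show CallPre n 0x100000 image_bytes 0x100040 0 _ _; v3_callpre himg hp.call, by v3_regnorm, by v3_regnorm, by v3_regnorm, hnum, by v3_frame hpa,
        A2.toks_frame htoks htlen (by v3_memnorm; v3_eqon) (by v3_omega), htlen,
        A2.region_callee henv.parserR (by v3_regnorm) (by v3_omega) (Nat.zero_le _),
        A2.region_callee hR (by v3_regnorm) (by v3_omega) (Nat.zero_le _), henv.parserToks⟩) ?_
    intro v1 hpost
    obtain ⟨hpost1, hres⟩ := hpost
    v3_open hpost1
    have hk := hpost1.kept
    v3_viewnorm at hpost1_rsp hpost1_same hres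
    j6f_bin
    unfold dataWins at hpost1_same
    have hcode1 : CodeAt v1.mem 0x10027a jsmn_parse_core_bytes := by v3_frame hcodeW
    clear hcodeW
    cases hal : allocToken Config.default s.p ts c.numTokens with
    | none =>
      rw [hal] at hres
      obtain ⟨hrax, hmem1⟩ := hres
      v3_walk hcode1 hfetch [] until [0x100462, 0x100529]
      have hb : openBracket Config.default ch c.numTokens s = .ret JSMN_ERROR_NOMEM { s with count := i32 (s.count + 1) } := by
        unfold openBracket; rw [hst]; simp only [hal]
      rw [hb]
      refine Reach.done ⟨by simp, A2.core_step hco (by v3_regnorm; rw [hpost1_rsp, hco_rsp]) (by v3_regnorm; rw [hk.get .rbp rfl]; v3_regnorm)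
        (by v3_regnorm; rw [hk.get .r14 rfl]; v3_regnorm) (by v3_regnorm; rw [hk.get .r13 rfl]; v3_regnorm) (by v3_regnorm; rw [hk.get .r12 rfl]; v3_regnorm)
        (by unfold dataWins PCtx.tlen; rw [htb]; v3_same) (by v3_memnorm; rw [hmem1]; v3_frame hpa) ?_ Iff.rfl, by v3_regnorm; decide⟩
      show ToksArg Config.default _ c.tb c.numTokens s.toks
      rw [hst]
      exact ⟨htb0, htlen, A2.toks_frame htoks htlen (by v3_memnorm; rw [hmem1]; v3_eqon) (by v3_omega)⟩
    | some r =>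
      obtain ⟨i, p', ts'⟩ := r
      rw [hal] at hres
      obtain ⟨hrax, hpa1, htoks1⟩ := hres
      obtain ⟨hi, hilt, hnext, hpos, hsup, hinv1⟩ := sf.alloc s.p ts c.numTokens i p' ts' (hst ▸ hinv) hal
      have htinv1 := hinv1.toks ts' rfl
      have hlen1 := htinv1.len
      have hsuplo := htinv1.superLo
      have hsuphi := htinv1.superHi
      simp only [links_default, Bool.false_eq_true, if_false] at hsuphi
      unfold tokAddr at hrax
      rw [tokSize_default] at hrax
      obtain ⟨hsupraw, hsupr1, hsupr2⟩ := hpa1.toksuper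
      v3_open hpa1.pos hpa1.toknext
      have hposlt := hinv1.pos
      have hnextlt := hinv1.toknextR
      clear henv_jsR_lo henv_jsR_hi henv_jsR_stk henv_jsR_img henv_parserJs henv_jsToks
      have hsmall := htinv1.small
      have hb := openBracket_some (ch := ch) (nt := c.numTokens) hst hal
      by_cases hm1 : p'.toksuper = -1
      · -- no superior token
        have hsupv : v1.mem.readLE (c.pa + 8) 4 = 4294967295 := by rw [hsupraw, hm1]; rfl
        clear hsupraw
        v3_walk hcode1 hfetch [] until [0x100384]
        rw [if_pos hm1] at hb
        rw [hb]
        refine Reach.mono (open_tail (ch := ch) (i := i) (p' := p') (tsL := ts') (by simp)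
          (A2.core_step hco (by v3_regnorm; rw [hpost1_rsp, hco_rsp]) (by v3_regnorm; rw [hk.get .rbp rfl]; v3_regnorm)
            (by v3_regnorm; rw [hk.get .r14 rfl]; v3_regnorm) (by v3_regnorm; rw [hk.get .r13 rfl]; v3_regnorm) (by v3_regnorm; rw [hk.get .r12 rfl]; v3_regnorm)
            (by unfold dataWins PCtx.tlen; rw [htb]; v3_same) (by v3_memnorm; exact hpa1) ⟨htb0, hlen1, by v3_memnorm; exact htoks1⟩
            (by simp [hst]))
          (by v3_regnorm; exact hrax) (by v3_regnorm; rw [hk.get .rbx rfl]; v3_regnorm; exact hat_rbx) hilt) ?_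
        rintro v' ⟨hrip', hco', hr15'⟩
        exact ⟨hrip', A2.frame_next (fuel := fuel) sf hfr (by rw [body_open _ _ _ _ _ hok, hb]) hco'
          (by rw [hr15']; v3_regnorm; rw [hk.get .r15 rfl]; v3_regnorm; exact A2.r15_inc _)⟩
      · -- tokens[toksuper].size++
        obtain ⟨j, hj⟩ : ∃ j : Nat, p'.toksuper = j := ⟨p'.toksuper.toNat, by omega⟩
        have hjlt : j < c.numTokens := by omega
        have hsupv : v1.mem.readLE (c.pa + 8) 4 = j := by rw [hsupraw, hj]; unfold u32; omega
        clear hsupraw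
        have hsext := Word.sext32_ofNat_of_lt j (by omega)
        have hshl := shl4_ofNat j (by omega)
        v3_walk hcode1 hfetch [hsext, hshl] until [0x100384]
        rw [if_neg hm1, hj] at hb
        rw [hb]
        refine Reach.mono (open_tail (ch := ch) (i := i) (p' := p') (tsL := tokUpd ts' (j : Int) fun t => { t with size := i32 (t.size + 1) }) (by simp)
          (A2.core_step hco (by v3_regnorm; rw [hpost1_rsp, hco_rsp]) (by v3_regnorm; rw [hk.get .rbp rfl]; v3_regnorm)
            (by v3_regnorm; rw [hk.get .r14 rfl]; v3_regnorm) (by v3_regnorm; rw [hk.get .r13 rfl]; v3_regnorm) (by v3_regnorm; rw [hk.get .r12 rfl]; v3_regnorm)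
            (by unfold dataWins PCtx.tlen; rw [htb]; v3_same) (by v3_frame hpa1)
            ⟨htb0, by rw [A2.tokUpd_nat, List.length_set]; exact hlen1, by v3_memnorm; exact A2.bump_tokens htoks1 hlen1 hjlt (by v3_omega)⟩
            (by simp [hst]))
          (by v3_regnorm; exact hrax) (by v3_regnorm; rw [hk.get .rbx rfl]; v3_regnorm; exact hat_rbx) hilt) ?_
        rintro v' ⟨hrip', hco', hr15'⟩
        exact ⟨hrip', A2.frame_next (fuel := fuel) sf hfr (by rw [body_open _ _ _ _ _ hok, hb]) hco'
          (by rw [hr15']; v3_regnorm; rw [hk.get .r15 rfl]; v3_regnorm; exact A2.r15_inc _)⟩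

end FD
end J6
end X86
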